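-- pv_equiv track=rewrite | github.com/Patrycja-Bien/pp1 | 05-Test1/mock/p5.py | f
-- ===== SOURCE A (Python) =====
-- def f(binary_number):
--     binary_number = str(binary_number)
--     for i in binary_number:
--         if i == "1" or i == "0":
--             continue
--         else:
--             return False
--     return True
-- ===== SOURCE B (Python) =====
-- def f(binary_number):
--     s = str(binary_number)
--     return s.count("0") + s.count("1") == len(s)
-- ===== Notes on version B (the rewrite author's own statement) =====
-- stated objective: alternative
-- what changed: Replaces A's per-character early-exit boolean loop with an arithmetic formulation: two counting passes (occurrences of '0' and of '1') followed by one comparison of their sum with the length.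
import Mathlib
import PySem

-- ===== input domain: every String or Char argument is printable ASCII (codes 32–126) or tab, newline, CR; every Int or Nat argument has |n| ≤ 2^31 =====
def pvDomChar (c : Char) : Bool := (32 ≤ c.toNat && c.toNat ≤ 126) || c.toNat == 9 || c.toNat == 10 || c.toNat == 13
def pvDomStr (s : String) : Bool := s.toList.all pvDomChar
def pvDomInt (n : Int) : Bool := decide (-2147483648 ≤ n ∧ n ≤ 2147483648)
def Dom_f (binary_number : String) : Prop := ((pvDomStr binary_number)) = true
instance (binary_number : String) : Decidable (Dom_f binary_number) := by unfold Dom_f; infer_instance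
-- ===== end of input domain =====

-- B replaces A's early-exit boolean loop with a counting formulation: count('0') + count('1') == len(s).

-- ===== PORT A =====
-- the for-loop with early 'return False': recursion over the characters
def fLoop (cs : List Char) : Bool :=
  match cs with
  | [] => true
  | c :: rest => if c = '1' ∨ c = '0' then fLoop rest else false

def f (binary_number : String) : Bool := fLoop binary_number.toList

-- ===== PORT B =====
-- s.count("0") + s.count("1") == len(s)
def f_alt (binary_number : String) : Bool :=
  decide (PySem.Str.count binary_number "0" + PySem.Str.count binary_number "1"
            = PySem.Str.len binary_number)

-- ===== PRECONDITION & SPEC =====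
def Spec_f (binary_number : String) (out : Bool) : Prop := out = f_alt binary_number
instance (binary_number : String) (out : Bool) : Decidable (Spec_f binary_number out) := by unfold Spec_f; infer_instance

-- ===== CLAIM (what is proved, stated in full; the proofs are below) =====
def Claim_equal_f : Prop := ∀ (binary_number : String), Dom_f binary_number → Spec_f binary_number (f binary_number)

-- ===== LEMMAS AND PROOFS =====
-- Python's str.count on a single-character needle is the character count.
theorem count_go_singleton (c : Char) (fuel : Nat) (l : List Char) (acc : Nat)
    (h : l.length ≤ fuel) :
    PySem.Chars.count.go [c] fuel l acc = acc + l.count c := by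
  induction fuel generalizing l acc with
  | zero =>
    have : l = [] := List.length_eq_zero_iff.mp (Nat.le_zero.mp h)
    subst this; simp [PySem.Chars.count.go]
  | succ n ih =>
    cases l with
    | nil => simp [PySem.Chars.count.go]
    | cons x t =>
      simp only [PySem.Chars.count.go]
      by_cases hx : x = c
      · subst hx
        have hp : List.isPrefixOf [x] (x :: t) = true := by simp [List.isPrefixOf]
        rw [if_pos hp]
        simp only [List.length_singleton, List.drop_one, List.tail_cons]
        rw [ih t (acc + 1) (by simpa using Nat.lt_succ_iff.mp (by simpa using h))]
        simp
        omega
      · have hp : List.isPrefixOf [c] (x :: t) = false := by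
          simp [List.isPrefixOf]
          intro hc; exact absurd hc.symm hx
        rw [if_neg (by simp [hp])]
        rw [ih t acc (by simpa using Nat.lt_succ_iff.mp (by simpa using h))]
        simp [hx]

theorem count_singleton (cs : List Char) (c : Char) :
    PySem.Chars.count cs [c] = cs.count c := by
  simp [PySem.Chars.count]
  have := count_go_singleton c cs.length cs 0 (le_refl _)
  omega

theorem count_le (cs : List Char) :
    cs.count '0' + cs.count '1' ≤ cs.length := by
  induction cs with
  | nil => simp
  | cons c t ih =>
    simp only [List.count_cons, List.length_cons]
    by_cases h0 : c = '0' <;> by_cases h1 : c = '1' <;> simp_all <;> omega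

theorem fLoop_eq_count (cs : List Char) :
    fLoop cs = decide (cs.count '0' + cs.count '1' = cs.length) := by
  induction cs with
  | nil => rfl
  | cons c t ih =>
    simp only [fLoop, List.count_cons, List.length_cons, ih]
    have ht := count_le t
    by_cases h1 : c = '1'
    · subst h1; simp; omega
    · by_cases h0 : c = '0'
      · subst h0; simp; omega
      · rw [if_neg (by tauto)]
        simp [h0, h1]
        omega

-- ===== VERDICT (by name: the statement is the Claim_ definition above) =====
theorem f_spec : Claim_equal_f := by
  intro s _
  unfold Spec_f f f_alt
  have h0 : PySem.Str.count s "0" = PySem.Chars.count s.toList ['0'] := by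
    simp [PySem.Str.count]
  have h1 : PySem.Str.count s "1" = PySem.Chars.count s.toList ['1'] := by
    simp [PySem.Str.count]
  rw [fLoop_eq_count, h0, h1, count_singleton, count_singleton]
  simp only [PySem.Str.len, decide_eq_decide]
  omega
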